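-- pv_equiv track=rewrite | github.com/deeppavlov/DeepPavlov | deeppavlov/models/kbqa/tree_to_sparql.py | choose_grounded_entity
-- ===== SOURCE A (Python) =====
-- from typing import Any, List, Tuple, Dict, Union
--
-- def choose_grounded_entity(grounded_entities: List[str], entities_dict: Dict[str, str]):
--     tags = [entities_dict.get(entity.lower(), "") for entity in grounded_entities]
--     if len(grounded_entities) > 1:
--         if not all([tags[i] == tags[0] for i in range(1, len(tags))]):
--             for f_tag in ["WORK_OF_ART", "FAC", "PERSON", "GPE"]:
--                 for entity, tag in zip(grounded_entities, tags):
--                     if tag == f_tag: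
--                         return [entity]
--         elif not all([entity[0].islower() for entity in grounded_entities]):
--             for entity in grounded_entities:
--                 if entity[0].isupper():
--                     return [entity]
--     return grounded_entities
-- ===== SOURCE B (Python) =====
-- from typing import List, Dict
--
-- PRIORITY = ["WORK_OF_ART", "FAC", "PERSON", "GPE"]
--
-- def choose_grounded_entity(grounded_entities: List[str], entities_dict: Dict[str, str]):
--     if len(grounded_entities) > 1:
--         tags = [entities_dict.get(e.lower(), "") for e in grounded_entities]
--         if any(t != tags[0] for t in tags):
--             # argmin by (priority rank, position) over entities with a priority tag
--             ranked = [(PRIORITY.index(t), i, e)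
--                       for i, (e, t) in enumerate(zip(grounded_entities, tags))
--                       if t in PRIORITY]
--             if ranked:
--                 return [min(ranked)[2]]
--         else:
--             caps = [e for e in grounded_entities if e[0].isupper()]
--             if caps:
--                 return caps[:1]
--     return grounded_entities
-- ===== Notes on version B (the rewrite author's own statement) =====
-- stated objective: alternative
-- what changed: B replaces A's cascade of per-priority-tag rescans with a single argmin: it builds (priority-rank, position, entity) triples for entities whose tag is a priority tag and returns the entity of the lexicographic minimum, and replaces the uppercase-first scan with a filter-then-take-first.
import Mathlib
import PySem

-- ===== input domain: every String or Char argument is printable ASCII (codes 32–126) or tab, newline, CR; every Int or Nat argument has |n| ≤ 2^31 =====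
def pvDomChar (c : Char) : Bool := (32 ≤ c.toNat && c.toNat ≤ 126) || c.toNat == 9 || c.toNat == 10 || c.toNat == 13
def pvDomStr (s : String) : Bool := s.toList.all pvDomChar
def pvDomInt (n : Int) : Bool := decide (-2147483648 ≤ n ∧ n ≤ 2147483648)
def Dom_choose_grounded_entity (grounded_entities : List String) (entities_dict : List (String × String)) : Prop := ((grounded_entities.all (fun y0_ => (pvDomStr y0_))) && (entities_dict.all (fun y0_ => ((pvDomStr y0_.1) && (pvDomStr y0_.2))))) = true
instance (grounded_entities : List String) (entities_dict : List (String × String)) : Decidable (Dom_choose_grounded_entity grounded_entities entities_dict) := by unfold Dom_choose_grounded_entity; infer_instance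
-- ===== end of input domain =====

-- B replaces A's cascade of per-priority-tag rescans with a single argmin over
-- (priority-rank, position, entity) triples, and the uppercase-first scan with filter-then-slice (alternative algorithm).


-- shared helpers (one Python line each, used verbatim by both sources):
-- entities_dict.get(entity.lower(), "")
def pvTag (entities_dict : List (String × String)) (e : String) : String :=
  (PySem.Dict.mk entities_dict).getD (PySem.Str.lower e) ""
-- entity[0].islower() / entity[0].isupper(); on "" Python raises IndexError (excluded by Pre_)
def pvFirstIslower (e : String) : Bool :=
  match e.toList with | c :: _ => PySem.Chars.islower c | [] => false
def pvFirstIsupper (e : String) : Bool :=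
  match e.toList with | c :: _ => PySem.Chars.isupper c | [] => false

-- ===== PORT A =====
def choose_grounded_entity (grounded_entities : List String) (entities_dict : List (String × String)) : List String :=
  let tags := grounded_entities.map (pvTag entities_dict)
  if 1 < grounded_entities.length then
    if ¬ ((PySem.List.pyRange 1 (tags.length : Int) 1).all
            (fun i => PySem.List.pyGetD tags i "" == PySem.List.pyGetD tags 0 "")) then
      match ["WORK_OF_ART", "FAC", "PERSON", "GPE"].findSome?
              (fun f_tag => (grounded_entities.zip tags).findSome?
                (fun p => if p.2 == f_tag then some [p.1] else none)) with
      | some r => r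
      | none => grounded_entities
    else if ¬ (grounded_entities.all (fun e => pvFirstIslower e)) then
      match grounded_entities.find? (fun e => pvFirstIsupper e) with
      | some e => [e]
      | none => grounded_entities
    else grounded_entities
  else grounded_entities

-- ===== PORT B =====
def pvPriority : List String := ["WORK_OF_ART", "FAC", "PERSON", "GPE"]

-- Python's tuple '<' on (int, int, str) triples, as used by min(ranked)
def pvLt3 (x m : Int × Int × String) : Bool :=
  x.1 < m.1 || (x.1 == m.1 && (x.2.1 < m.2.1 || (x.2.1 == m.2.1 && decide (x.2.2 < m.2.2))))

def choose_grounded_entity_alt (grounded_entities : List String) (entities_dict : List (String × String)) : List String :=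
  if 1 < grounded_entities.length then
    let tags := grounded_entities.map (pvTag entities_dict)
    if tags.any (fun t => !(t == PySem.List.pyGetD tags 0 "")) then
      let ranked : List (Int × Int × String) :=
        (PySem.List.enumerate (grounded_entities.zip tags)).filterMap
          (fun q => if pvPriority.contains q.2.2 then
              some ((((PySem.List.index? pvPriority q.2.2).getD 0 : Nat) : Int), q.1, q.2.1)
            else none)
      match ranked with
      | [] => grounded_entities
      | x :: rest => [(rest.foldl (fun m r => if pvLt3 r m then r else m) x).2.2]
    else
      let caps := grounded_entities.filter (fun e => pvFirstIsupper e)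
      if caps.isEmpty then grounded_entities else PySem.List.slice caps none (some 1)
  else grounded_entities

-- ===== PRECONDITION & SPEC =====
-- Pre_ excludes exactly the inputs where Python A raises IndexError: more than one entity, all
-- tags equal, and some entity is the empty string (then entity[0] is evaluated on "").
def Pre_choose_grounded_entity (grounded_entities : List String) (entities_dict : List (String × String)) : Prop :=
  ¬ (1 < grounded_entities.length ∧
     (∀ e ∈ grounded_entities, pvTag entities_dict e = pvTag entities_dict (grounded_entities.headD "")) ∧
     "" ∈ grounded_entities)
instance (grounded_entities : List String) (entities_dict : List (String × String)) : Decidable (Pre_choose_grounded_entity grounded_entities entities_dict) := by unfold Pre_choose_grounded_entity; infer_instance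
def pvWitness_choose_grounded_entity : List String × (List (String × String)) :=
  (["Mona Lisa", "paris"], [("mona lisa", "WORK_OF_ART"), ("paris", "GPE")])
def Spec_choose_grounded_entity (grounded_entities : List String) (entities_dict : List (String × String)) (out : List String) : Prop := out = choose_grounded_entity_alt grounded_entities entities_dict
instance (grounded_entities : List String) (entities_dict : List (String × String)) (out : List String) : Decidable (Spec_choose_grounded_entity grounded_entities entities_dict out) := by unfold Spec_choose_grounded_entity; infer_instance

-- ===== CLAIM (what is proved, stated in full; the proofs are below) =====
def Claim_equal_choose_grounded_entity : Prop := ∀ (grounded_entities : List String) (entities_dict : List (String × String)), Dom_choose_grounded_entity grounded_entities entities_dict → Pre_choose_grounded_entity grounded_entities entities_dict → Spec_choose_grounded_entity grounded_entities entities_dict (choose_grounded_entity grounded_entities entities_dict)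

-- ===== LEMMAS AND PROOFS =====

-- rank of a tag in the priority list, written out
def pvRank? (t : String) : Option Int :=
  if t == "WORK_OF_ART" then some 0
  else if t == "FAC" then some 1
  else if t == "PERSON" then some 2
  else if t == "GPE" then some 3
  else none

-- A's cascade, written as four find?s
def pvAaux (prs : List (String × String)) : Option (Int × String) :=
  match prs.find? (fun q => q.2 == "WORK_OF_ART") with
  | some p => some (0, p.1)
  | none => match prs.find? (fun q => q.2 == "FAC") with
    | some p => some (1, p.1)
    | none => match prs.find? (fun q => q.2 == "PERSON") with
      | some p => some (2, p.1)
      | none => match prs.find? (fun q => q.2 == "GPE") with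
        | some p => some (3, p.1)
        | none => none

def pvRstep (p : String × String) (acc : Option (Int × String)) : Option (Int × String) :=
  match pvRank? p.2 with
  | none => acc
  | some j => match acc with
    | none => some (j, p.1)
    | some (k, e) => if j ≤ k then some (j, p.1) else some (k, e)

-- B's candidate list, written recursively
def pvRankedF (n : Int) (prs : List (String × String)) : List (Int × Int × String) :=
  match prs with
  | [] => []
  | p :: rest => match pvRank? p.2 with
    | some j => (j, n, p.1) :: pvRankedF (n + 1) rest
    | none => pvRankedF (n + 1) rest

-- first minimum by rank (= Python's min by lex order, given strictly increasing positions)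
def pvFMin : List (Int × Int × String) → Option (Int × Int × String)
  | [] => none
  | r :: rest => match pvFMin rest with
    | none => some r
    | some m => some (if m.1 < r.1 then m else r)

theorem pv_inner_find (prs : List (String × String)) (f : String) :
    prs.findSome? (fun p => if p.2 == f then some [p.1] else none) =
      (prs.find? (fun p => p.2 == f)).map (fun p => ([p.1] : List String)) := by
  induction prs with
  | nil => simp
  | cons p rest ih =>
    simp only [List.findSome?_cons, List.find?_cons]
    by_cases h : p.2 == f
    · simp [h]
    · simp only [h]
      simpa using ih

theorem pv_A_inner (prs : List (String × String)) :
    (["WORK_OF_ART", "FAC", "PERSON", "GPE"].findSome?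
        (fun f => (prs.find? (fun p => p.2 == f)).map (fun p => ([p.1] : List String)))) =
      (pvAaux prs).map (fun r => ([r.2] : List String)) := by
  unfold pvAaux
  cases hW : prs.find? (fun q => q.2 == "WORK_OF_ART") <;>
  cases hF : prs.find? (fun q => q.2 == "FAC") <;>
  cases hP : prs.find? (fun q => q.2 == "PERSON") <;>
  cases hG : prs.find? (fun q => q.2 == "GPE") <;>
  simp [hW, hF, hP, hG]

theorem pv_Aaux_cons (p : String × String) (rest : List (String × String)) :
    pvAaux (p :: rest) = pvRstep p (pvAaux rest) := by
  unfold pvAaux pvRstep pvRank?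
  cases e0 : (p.2 == "WORK_OF_ART") <;> cases e1 : (p.2 == "FAC") <;>
  cases e2 : (p.2 == "PERSON") <;> cases e3 : (p.2 == "GPE") <;>
  simp only [List.find?_cons, e0, e1, e2, e3] <;>
  cases hW : rest.find? (fun q => q.2 == "WORK_OF_ART") <;>
  cases hF : rest.find? (fun q => q.2 == "FAC") <;>
  cases hP : rest.find? (fun q => q.2 == "PERSON") <;>
  cases hG : rest.find? (fun q => q.2 == "GPE") <;>
  simp_all

theorem pv_portF (i : Int) (p : String × String) :
    (if pvPriority.contains p.2 then
        some ((((PySem.List.index? pvPriority p.2).getD 0 : Nat) : Int), i, p.1)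
      else none) = (pvRank? p.2).map (fun j => (j, i, p.1)) := by
  by_cases h0 : p.2 = "WORK_OF_ART"
  · simp only [pvPriority, pvRank?, h0, PySem.List.index?_eq_idxOf?]; norm_num
  by_cases h1 : p.2 = "FAC"
  · simp only [pvPriority, pvRank?, h1, PySem.List.index?_eq_idxOf?]; norm_num
    all_goals decide
  by_cases h2 : p.2 = "PERSON"
  · simp only [pvPriority, pvRank?, h2, PySem.List.index?_eq_idxOf?]; norm_num
    all_goals decide
  by_cases h3 : p.2 = "GPE"
  · simp only [pvPriority, pvRank?, h3, PySem.List.index?_eq_idxOf?]; norm_num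
    all_goals decide
  · simp [pvPriority, pvRank?, h0, h1, h2, h3]

theorem pv_ranked_eq (prs : List (String × String)) (n : Int) :
    (PySem.List.enumerate prs n).filterMap
        (fun q => if pvPriority.contains q.2.2 then
            some ((((PySem.List.index? pvPriority q.2.2).getD 0 : Nat) : Int), q.1, q.2.1)
          else none) = pvRankedF n prs := by
  rw [show (fun q : Int × (String × String) => if pvPriority.contains q.2.2 then
        some ((((PySem.List.index? pvPriority q.2.2).getD 0 : Nat) : Int), q.1, q.2.1)
      else none) = (fun q => (pvRank? q.2.2).map (fun j => (j, q.1, q.2.1))) from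
    funext fun q => pv_portF q.1 q.2]
  induction prs generalizing n with
  | nil => simp [PySem.List.enumerate, pvRankedF]
  | cons p rest ih =>
    rw [PySem.List.enumerate_cons, List.filterMap_cons]
    simp only [pvRankedF]
    cases hr : pvRank? p.2 <;> simp [ih]

theorem pv_rankedF_le (prs : List (String × String)) :
    ∀ (n : Int), ∀ r ∈ pvRankedF n prs, n ≤ r.2.1 := by
  induction prs with
  | nil => intro n r hr; simp [pvRankedF] at hr
  | cons p rest ih =>
    intro n r hr
    simp only [pvRankedF] at hr
    cases hj : pvRank? p.2 <;> rw [hj] at hr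
    · have := ih (n + 1) r hr; omega
    · rcases List.mem_cons.mp hr with h | h
      · subst h; simp
      · have := ih (n + 1) r h; omega

theorem pv_rankedF_pairwise (prs : List (String × String)) (n : Int) :
    (pvRankedF n prs).Pairwise (fun a b => a.2.1 < b.2.1) := by
  induction prs generalizing n with
  | nil => simp [pvRankedF]
  | cons p rest ih =>
    simp only [pvRankedF]
    cases hj : pvRank? p.2
    · exact ih (n + 1)
    · refine List.Pairwise.cons ?_ (ih (n + 1))
      intro b hb
      have := pv_rankedF_le rest (n + 1) b hb
      change n < b.2.1
      omega

theorem pv_pvLt3_idx (a b : Int × Int × String) (h : b.2.1 < a.2.1) :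
    pvLt3 a b = decide (a.1 < b.1) := by
  have h1 : (a.2.1 == b.2.1) = false := by simp; omega
  have h2 : decide (a.2.1 < b.2.1) = false := by simp; omega
  simp [pvLt3, h1, h2]

theorem pv_fold (l : List (Int × Int × String)) (x : Int × Int × String)
    (h1 : ∀ r ∈ l, x.2.1 < r.2.1) (h2 : l.Pairwise (fun a b => a.2.1 < b.2.1)) :
    l.foldl (fun m r => if pvLt3 r m then r else m) x =
      match pvFMin l with
      | none => x
      | some m => if m.1 < x.1 then m else x := by
  induction l generalizing x with
  | nil => simp [pvFMin]
  | cons r rest ih =>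
    have hx : x.2.1 < r.2.1 := h1 r (by simp)
    have hstep : (if pvLt3 r x then r else x) = (if r.1 < x.1 then r else x) := by
      rw [pv_pvLt3_idx r x hx]; simp
    simp only [List.foldl_cons, hstep]
    have hrest1 : ∀ s ∈ rest, (if r.1 < x.1 then r else x).2.1 < s.2.1 := by
      intro s hs
      have hr := (List.pairwise_cons.mp h2).1 s hs
      have hxs := h1 s (by simp [hs])
      split <;> omega
    rw [ih _ hrest1 (List.pairwise_cons.mp h2).2]
    cases hm : pvFMin rest with
    | none => simp [pvFMin, hm]
    | some m =>
      simp only [pvFMin, hm]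
      by_cases hmr : m.1 < r.1 <;> by_cases hrx : r.1 < x.1 <;> by_cases hmx : m.1 < x.1 <;>
        simp [hmr, hrx, hmx] <;> first | rfl | (exfalso; omega)

theorem pv_MAIN (prs : List (String × String)) (n : Int) :
    pvAaux prs = (pvFMin (pvRankedF n prs)).map (fun m => (m.1, m.2.2)) := by
  induction prs generalizing n with
  | nil => rfl
  | cons p rest ih =>
    rw [pv_Aaux_cons]
    simp only [pvRankedF, pvRstep]
    cases hr : pvRank? p.2 with
    | none => exact ih (n + 1)
    | some j =>
      cases hm : pvFMin (pvRankedF (n + 1) rest) with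
      | none =>
        have h := ih (n + 1); rw [hm] at h
        rw [h, show pvFMin ((j, n, p.1) :: pvRankedF (n + 1) rest) = some (j, n, p.1) from
          by rw [pvFMin, hm]]
        rfl
      | some m =>
        have h := ih (n + 1); rw [hm] at h
        rw [h, show pvFMin ((j, n, p.1) :: pvRankedF (n + 1) rest) =
            some (if m.1 < j then m else (j, n, p.1)) from by rw [pvFMin, hm]]
        by_cases hlt : m.1 < j
        · simp [hlt, show ¬ j ≤ m.1 by omega]
        · simp [hlt, show j ≤ m.1 by omega]

theorem pv_find?_filter {α : Type} (l : List α) (p : α → Bool) :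
    l.find? p = (l.filter p).head? := by
  induction l with
  | nil => rfl
  | cons a rest ih =>
    rw [List.filter_cons]
    cases h : p a
    · rw [List.find?_cons_of_neg (by simp [h])]
      simp only [Bool.false_eq_true, if_false]
      exact ih
    · rw [List.find?_cons_of_pos (by simp [h])]
      simp

theorem pv_upper_not_lower (c : Char) (h : PySem.Chars.isupper c = true) :
    PySem.Chars.islower c = false := by
  simp only [PySem.Chars.isupper, PySem.Chars.islower, Bool.and_eq_true, decide_eq_true_eq,
    Bool.and_eq_false_iff, decide_eq_false_iff_not, not_le] at *
  left
  calc c ≤ 'Z' := h.2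
    _ < 'a' := by decide

theorem pv_cond_eq (x : String) (l : List String) (f : String → String) :
    ((x :: l).map f).any (fun t => !(t == PySem.List.pyGetD ((x :: l).map f) 0 "")) =
      !(((x :: l).map f).drop 1).all (fun t => t == PySem.List.pyGetD ((x :: l).map f) 0 "") := by
  simp [PySem.List.pyGetD_zero, List.any_eq_not_all_not]

theorem pv_headD_getD (l : List String) (d : String) : l.headD d = l.getD 0 d := by
  cases l <;> rfl

theorem pv_allEq_A (xs : List String) :
    ((PySem.List.pyRange 1 (xs.length : Int) 1).all
        (fun i => PySem.List.pyGetD xs i "" == PySem.List.pyGetD xs 0 "")) =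
      (xs.drop 1).all (fun t => t == xs.headD "") := by
  have h := PySem.List.map_pyGetD_pyRange' xs "" (a := 1) (by omega)
  norm_num at h
  rw [show xs.drop 1 = xs.tail from by simp, ← h, List.all_map, PySem.List.pyGetD_zero]
  cases xs <;> simp [Function.comp_def]

theorem pv_main (ge : List String) (ed : List (String × String)) :
    choose_grounded_entity ge ed = choose_grounded_entity_alt ge ed := by
  by_cases hlen : 1 < ge.length
  · cases ge with
    | nil => simp at hlen
    | cons x l =>
      simp only [choose_grounded_entity, choose_grounded_entity_alt]
      rw [if_pos hlen, if_pos hlen]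
      have hA : ((PySem.List.pyRange 1 ((((x :: l).map (pvTag ed)).length : Int)) 1).all
          (fun i => PySem.List.pyGetD ((x :: l).map (pvTag ed)) i "" ==
            PySem.List.pyGetD ((x :: l).map (pvTag ed)) 0 "")) =
          (((x :: l).map (pvTag ed)).drop 1).all
            (fun t => t == PySem.List.pyGetD ((x :: l).map (pvTag ed)) 0 "") := by
        rw [pv_allEq_A, PySem.List.pyGetD_zero, pv_headD_getD]
      have hB : ((x :: l).map (pvTag ed)).any
            (fun t => !(t == PySem.List.pyGetD ((x :: l).map (pvTag ed)) 0 "")) =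
          !(((x :: l).map (pvTag ed)).drop 1).all
            (fun t => t == PySem.List.pyGetD ((x :: l).map (pvTag ed)) 0 "") :=
        pv_cond_eq x l (pvTag ed)
      rw [hA, hB]
      cases hEq : ((((x :: l).map (pvTag ed)).drop 1).all
          (fun t => t == PySem.List.pyGetD ((x :: l).map (pvTag ed)) 0 ""))
      · -- tags differ: A cascade of rescans = B argmin over ranked triples
        rw [if_pos (show ¬ (false = true) by simp), if_pos (show ((!false) = true) from rfl)]
        rw [show (fun f_tag => ((x :: l).zip ((x :: l).map (pvTag ed))).findSome?
              (fun p => if p.2 == f_tag then some [p.1] else none)) =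
            (fun f_tag => (((x :: l).zip ((x :: l).map (pvTag ed))).find?
              (fun p => p.2 == f_tag)).map (fun p => ([p.1] : List String))) from
          funext fun f => pv_inner_find _ f]
        rw [pv_A_inner, pv_MAIN ((x :: l).zip ((x :: l).map (pvTag ed))) 0, pv_ranked_eq]
        cases hR : pvRankedF 0 ((x :: l).zip ((x :: l).map (pvTag ed))) with
        | nil => rfl
        | cons y rest =>
          have hpw := pv_rankedF_pairwise ((x :: l).zip ((x :: l).map (pvTag ed))) 0
          rw [hR] at hpw
          have hfold := pv_fold rest y (List.pairwise_cons.mp hpw).1 (List.pairwise_cons.mp hpw).2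
          have hsome : pvFMin (y :: rest) =
              some (rest.foldl (fun m r => if pvLt3 r m then r else m) y) := by
            rw [hfold]
            simp only [pvFMin]
            cases hm : pvFMin rest <;> rfl
          rw [hsome]
          rfl
      · -- all tags equal: A takes the elif branch, B takes the caps branch
        rw [if_neg (show ¬ ¬ (true = true) by simp), if_neg (show ¬ ((!true) = true) by simp)]
        cases hcaps : (x :: l).filter (fun e => pvFirstIsupper e) with
        | nil =>
          have hfind : (x :: l).find? (fun e => pvFirstIsupper e) = none := by
            rw [pv_find?_filter, hcaps]; rfl
          rw [hfind]
          by_cases hg : ((x :: l).all (fun e => pvFirstIslower e)) = true <;> simp [hg]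
        | cons e rest =>
          have hmem : e ∈ (x :: l).filter (fun e => pvFirstIsupper e) := by rw [hcaps]; simp
          have hup : pvFirstIsupper e = true := (List.mem_filter.mp hmem).2
          have hin : e ∈ (x :: l) := (List.mem_filter.mp hmem).1
          have hfind : (x :: l).find? (fun e => pvFirstIsupper e) = some e := by
            rw [pv_find?_filter, hcaps]; rfl
          have hnotall : ¬ ((x :: l).all (fun e => pvFirstIslower e)) = true := by
            intro hall
            have hlow := List.all_eq_true.mp hall e hin
            obtain ⟨c, cs, hc⟩ : ∃ c cs, e.toList = c :: cs := by
              rcases hcl : e.toList with _ | ⟨c, cs⟩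
              · exfalso; simp [pvFirstIsupper, hcl] at hup
              · exact ⟨c, cs, rfl⟩
            have hupc : PySem.Chars.isupper c = true := by
              simpa [pvFirstIsupper, hc] using hup
            have := pv_upper_not_lower c hupc
            simp [pvFirstIslower, hc, this] at hlow
          rw [hfind, if_pos hnotall]
          rw [show (e :: rest).isEmpty = false from rfl]
          simp only [Bool.false_eq_true, if_false]
          rw [PySem.List.slice_to (e :: rest) (by norm_num)]
          rfl
  · simp only [choose_grounded_entity, choose_grounded_entity_alt]
    rw [if_neg hlen, if_neg hlen]

-- ===== VERDICT (by name: the statement is the Claim_ definition above) =====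
theorem choose_grounded_entity_spec : Claim_equal_choose_grounded_entity := by
  intro ge ed _ _
  unfold Spec_choose_grounded_entity
  exact pv_main ge ed
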